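-- pv_equiv track=rewrite | github.com/viking2412/advent-of-code | 12.py | optimized_check
-- ===== SOURCE A (Python) =====
-- def optimized_check(line, mapping):
--     temp = 0
--     map_check = []
--     for i, ch in enumerate(line):
--         if temp != 0 and ch == ".":
--             map_check.append(temp)
--             temp = 0
--         if ch == "#":
--             temp += 1
--         if i == len(line)-1 and temp != 0:
--             map_check.append(temp)
--     if map_check == mapping:
--         return 1
--     return 0
-- ===== SOURCE B (Python) =====
-- def optimized_check(line, mapping):
--     groups = [seg.count('#') for seg in line.split('.') if '#' in seg]
--     return 1 if groups == mapping else 0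
-- ===== Notes on version B (the rewrite author's own statement) =====
-- stated objective: idiomatic
-- what changed: Replaces the index-tracking character scan with accumulator and last-index flush by splitting the line on '.' and counting '#' in each segment that contains one.
import Mathlib
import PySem

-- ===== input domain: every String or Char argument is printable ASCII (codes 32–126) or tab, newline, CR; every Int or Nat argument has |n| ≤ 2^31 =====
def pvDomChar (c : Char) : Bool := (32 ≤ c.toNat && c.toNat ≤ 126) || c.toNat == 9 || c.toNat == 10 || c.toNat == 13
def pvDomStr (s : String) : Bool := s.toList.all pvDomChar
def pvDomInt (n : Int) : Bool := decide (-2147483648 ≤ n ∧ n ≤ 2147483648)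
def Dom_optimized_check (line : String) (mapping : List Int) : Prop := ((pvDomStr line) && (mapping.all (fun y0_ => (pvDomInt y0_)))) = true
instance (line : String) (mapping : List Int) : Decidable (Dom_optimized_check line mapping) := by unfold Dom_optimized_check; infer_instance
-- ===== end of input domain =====

-- B replaces A's index-tracking scan (accumulator + last-index flush) by split('.') and
-- per-segment '#' counts (objective: idiomatic). Return values proved equal on all inputs.

-- ===== PORT A =====
-- the body of A's 'for i, ch in enumerate(line)' loop, step for step
def optAStep (n : Int) (st : Int × List Int) (p : Int × Char) : Int × List Int :=
  let temp := st.1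
  let mc := st.2
  let (mc, temp) := if temp ≠ 0 ∧ p.2 = '.' then (mc ++ [temp], (0 : Int)) else (mc, temp)
  let temp := if p.2 = '#' then temp + 1 else temp
  let mc := if p.1 = n - 1 ∧ temp ≠ 0 then mc ++ [temp] else mc
  (temp, mc)

def optimized_check (line : String) (mapping : List Int) : Int :=
  if ((PySem.List.enumerate line.toList 0).foldl (optAStep (PySem.Str.len line)) (0, [])).2 = mapping
  then 1 else 0

-- ===== PORT B =====
def optimized_check_alt (line : String) (mapping : List Int) : Int :=
  if ((PySem.Chars.splitOn line.toList ['.']).filter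
        (fun seg => PySem.Chars.isIn ['#'] seg)).map
        (fun seg => ((PySem.Chars.count seg ['#'] : Nat) : Int)) = mapping
  then 1 else 0

-- ===== PRECONDITION & SPEC =====
def Spec_optimized_check (line : String) (mapping : List Int) (out : Int) : Prop := out = optimized_check_alt line mapping
instance (line : String) (mapping : List Int) (out : Int) : Decidable (Spec_optimized_check line mapping out) := by unfold Spec_optimized_check; infer_instance

-- ===== CLAIM (what is proved, stated in full; the proofs are below) =====
def Claim_equal_optimized_check : Prop := ∀ (line : String) (mapping : List Int), Dom_optimized_check line mapping → Spec_optimized_check line mapping (optimized_check line mapping)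

-- ===== LEMMAS AND PROOFS =====

-- common spec: the '#'-group sizes of the rest of the line, given the running count `temp`
def pvGroups : List Char → Int → List Int
  | [], temp => if temp ≠ 0 then [temp] else []
  | c :: cs, temp =>
    if c = '.' then (if temp ≠ 0 then temp :: pvGroups cs 0 else pvGroups cs 0)
    else pvGroups cs (if c = '#' then temp + 1 else temp)

-- A's loop computes pvGroups
lemma foldA (n : Nat) : ∀ (cs : List Char) (k : Nat), k + cs.length = n → cs ≠ [] →
    ∀ (temp : Int) (mc : List Int),
    ((PySem.List.enumerate cs (k : Int)).foldl (optAStep (n : Int)) (temp, mc)).2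
      = mc ++ pvGroups cs temp := by
  intro cs
  induction cs with
  | nil => intro k _ h; exact absurd rfl h
  | cons c rest ih =>
    intro k hk _ temp mc
    rw [PySem.List.enumerate_cons, List.foldl_cons]
    cases rest with
    | nil =>
      -- last character: i == len-1, flush if temp ≠ 0
      simp only [List.length_cons, List.length_nil] at hk
      have hkn : (k : Int) = (n : Int) - 1 := by omega
      simp only [PySem.List.enumerate_nil, List.foldl_nil, optAStep, hkn, pvGroups]
      by_cases h1 : temp ≠ 0 ∧ c = '.'
      · simp [h1, h1.2]
      · by_cases h2 : c = '.'
        · have ht : temp = 0 := by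
            by_contra h; exact h1 ⟨h, h2⟩
          simp [h1, h2, ht]
        · by_cases h3 : c = '#'
          · simp only [if_neg h1, if_pos h3]
            split_ifs with h4 h5 h5 <;> simp_all
          · simp only [if_neg h1, if_neg h3, if_neg h2]
            split_ifs with h4 h5 h5 <;> simp_all
    | cons d rest' =>
      -- not the last character: no flush
      have hlt : (k : Int) ≠ (n : Int) - 1 := by
        simp only [List.length_cons] at hk; omega
      have hrec := ih (k + 1) (by simp only [List.length_cons] at hk ⊢; omega)
        (by simp)
      have hcast : ((k : Int) + 1) = ((k + 1 : Nat) : Int) := by push_cast; ring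
      by_cases h1 : temp ≠ 0 ∧ c = '.'
      · have hnh : ¬ c = '#' := by simp [h1.2]
        simp only [optAStep, if_pos h1, if_neg hnh]
        rw [if_neg (by simp : ¬ ((k : Int) = (n : Int) - 1 ∧ (0 : Int) ≠ 0))]
        rw [hcast, hrec 0 (mc ++ [temp])]
        simp [pvGroups, h1.2, h1.1, if_neg hnh]
      · by_cases h2 : c = '.'
        · have ht : temp = 0 := by by_contra h; exact h1 ⟨h, h2⟩
          have hnh : ¬ c = '#' := by simp [h2]
          simp only [optAStep, if_neg h1, if_neg hnh]
          rw [if_neg (by simp [hlt] : ¬ ((k : Int) = (n : Int) - 1 ∧ temp ≠ 0))]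
          rw [hcast, hrec temp mc]
          simp [pvGroups, h2, ht]
        · by_cases h3 : c = '#'
          · simp only [optAStep, if_neg h1, if_pos h3]
            rw [if_neg (by simp [hlt] : ¬ ((k : Int) = (n : Int) - 1 ∧ temp + 1 ≠ 0))]
            rw [hcast, hrec (temp + 1) mc]
            simp [pvGroups, h2, h3]
          · simp only [optAStep, if_neg h1, if_neg h3]
            rw [if_neg (by simp [hlt] : ¬ ((k : Int) = (n : Int) - 1 ∧ temp ≠ 0))]
            rw [hcast, hrec temp mc]
            simp [pvGroups, h2, h3]

-- split helpers: a structural form of PySem.Chars.splitOn for the one-character separator '.'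
def pvSegs : List Char → List Char → List (List Char)
  | [], cur => [cur.reverse]
  | c :: l, cur => if c = '.' then cur.reverse :: pvSegs l [] else pvSegs l (c :: cur)

lemma splitOn_go_dot : ∀ (fuel : Nat) (l cur : List Char) (acc : List (List Char)),
    l.length < fuel →
    PySem.Chars.splitOn.go ['.'] fuel l cur acc = acc.reverse ++ pvSegs l cur := by
  intro fuel
  induction fuel with
  | zero => intro l cur acc h; omega
  | succ f ih =>
    intro l cur acc h
    cases l with
    | nil => simp [PySem.Chars.splitOn.go, pvSegs]
    | cons c rest =>
      by_cases hc : c = '.'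
      · have hpre : List.isPrefixOf ['.'] (c :: rest) = true := by simp [List.isPrefixOf, hc]
        rw [PySem.Chars.splitOn.go, if_pos hpre]
        simp only [List.length_cons, List.length_nil, List.drop_succ_cons, List.drop_zero]
        rw [ih rest [] (cur.reverse :: acc) (by simp at h; omega)]
        simp [pvSegs, hc]
      · have hpre : ¬ List.isPrefixOf ['.'] (c :: rest) = true := by
          simp [List.isPrefixOf]
          exact fun hcontra => hc hcontra.symm
        rw [PySem.Chars.splitOn.go, if_neg hpre]
        rw [ih rest (c :: cur) acc (by simp at h; omega)]
        simp [pvSegs, hc]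

lemma splitOn_dot (l : List Char) : PySem.Chars.splitOn l ['.'] = pvSegs l [] := by
  rw [PySem.Chars.splitOn, splitOn_go_dot (l.length + 1) l [] [] (by omega)]
  rfl

-- single-character count: PySem.Chars.count with sub = ['#'] is List.count '#'
lemma count_go_hash : ∀ (fuel : Nat) (l : List Char) (acc : Nat),
    l.length ≤ fuel →
    PySem.Chars.count.go ['#'] fuel l acc = acc + l.count '#' := by
  intro fuel
  induction fuel with
  | zero =>
    intro l acc h
    have : l = [] := by cases l <;> simp_all
    subst this; simp [PySem.Chars.count.go]
  | succ f ih =>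
    intro l acc h
    cases l with
    | nil => simp [PySem.Chars.count.go]
    | cons c rest =>
      by_cases hc : c = '#'
      · have hpre : List.isPrefixOf ['#'] (c :: rest) = true := by simp [List.isPrefixOf, hc]
        rw [PySem.Chars.count.go, if_pos hpre]
        simp only [List.length_cons, List.length_nil, List.drop_succ_cons, List.drop_zero]
        rw [ih rest (acc + 1) (by simp at h; omega)]
        simp [hc, List.count_cons]; omega
      · have hpre : ¬ List.isPrefixOf ['#'] (c :: rest) = true := by
          simp [List.isPrefixOf]
          exact fun hcontra => hc hcontra.symm
        rw [PySem.Chars.count.go, if_neg hpre]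
        rw [ih rest acc (by simp at h; omega)]
        simp [List.count_cons, hc]

lemma count_hash (l : List Char) : PySem.Chars.count l ['#'] = l.count '#' := by
  rw [PySem.Chars.count]
  simp only [List.isEmpty_cons, if_false, Bool.false_eq_true]
  simpa using count_go_hash l.length l 0 le_rfl

-- '#' in seg  ↔  '#' is an element of seg
lemma isIn_hash (l : List Char) : PySem.Chars.isIn ['#'] l = l.contains '#' := by
  by_cases h : '#' ∈ l
  · rw [(PySem.Chars.isIn_iff_infix ['#'] l).2 ?_]
    · simp [h]
    · obtain ⟨s, t, rfl⟩ := List.append_of_mem h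
      exact ⟨s, t, by simp⟩
  · rw [(PySem.Chars.isIn_eq_false_iff ['#'] l).2 ?_]
    · simp [h]
    · intro hinf
      exact h (hinf.subset (by simp))

-- B's split-and-count computes pvGroups
lemma segs_groups : ∀ (l cur : List Char),
    ((pvSegs l cur).filter (fun seg => seg.contains '#')).map
      (fun seg => ((seg.count '#' : Nat) : Int))
      = pvGroups l ((cur.count '#' : Nat) : Int) := by
  intro l
  induction l with
  | nil =>
    intro cur
    simp only [pvSegs, pvGroups]
    rw [List.filter_cons]
    by_cases h : '#' ∈ cur
    · have hn : cur.count '#' ≠ 0 := by simpa [List.count_eq_zero] using h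
      have hnz : ((cur.count '#' : Nat) : Int) ≠ 0 := by exact_mod_cast hn
      rw [if_pos (by simp [h])]
      simp [List.count_reverse, hnz, hn]
    · have hz : cur.count '#' = 0 := by simp [List.count_eq_zero, h]
      rw [if_neg (by simp [h])]
      simp [hz]
  | cons c rest ih =>
    intro cur
    simp only [pvSegs, pvGroups]
    by_cases hc : c = '.'
    · rw [if_pos hc, if_pos hc]
      rw [List.filter_cons]
      by_cases h : '#' ∈ cur
      · have hn : cur.count '#' ≠ 0 := by simpa [List.count_eq_zero] using h
        have hnz : ((cur.count '#' : Nat) : Int) ≠ 0 := by exact_mod_cast hn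
        rw [if_pos (by simp [h])]
        rw [List.map_cons]
        have := ih []
        simp only [List.count_nil, Nat.cast_zero] at this
        rw [this]
        simp [List.count_reverse, hnz, hn]
      · have hz : cur.count '#' = 0 := by simp [List.count_eq_zero, h]
        rw [if_neg (by simp [h])]
        have := ih []
        simp only [List.count_nil, Nat.cast_zero] at this
        rw [this]
        simp [hz]
    · rw [if_neg hc, if_neg hc, ih (c :: cur)]
      by_cases hh : c = '#'
      · simp [List.count_cons, hh]
      · simp [List.count_cons, hh]

lemma alt_groups (l : List Char) :
    ((PySem.Chars.splitOn l ['.']).filter (fun seg => PySem.Chars.isIn ['#'] seg)).map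
      (fun seg => ((PySem.Chars.count seg ['#'] : Nat) : Int)) = pvGroups l 0 := by
  rw [splitOn_dot]
  have h1 : (fun seg => PySem.Chars.isIn ['#'] seg) = (fun seg : List Char => seg.contains '#') := by
    funext seg; exact isIn_hash seg
  have h2 : (fun seg : List Char => ((PySem.Chars.count seg ['#'] : Nat) : Int))
      = (fun seg : List Char => ((seg.count '#' : Nat) : Int)) := by
    funext seg; rw [count_hash]
  rw [h1, h2]
  have := segs_groups l []
  simpa using this

-- ===== VERDICT (by name: the statement is the Claim_ definition above) =====
theorem optimized_check_spec : Claim_equal_optimized_check := by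
  intro line mapping _
  unfold Spec_optimized_check optimized_check optimized_check_alt
  rw [alt_groups]
  cases hcs : line.toList with
  | nil => simp [hcs, PySem.List.enumerate_nil, pvGroups]
  | cons c rest =>
    have hlen : PySem.Str.len line = ((line.toList.length : Nat) : Int) := by
      simp [PySem.Str.len_eq]
    rw [hlen, hcs]
    have h := foldA (c :: rest).length (c :: rest) 0 (by omega) (by simp) 0 []
    simp only [Nat.cast_zero, List.nil_append] at h
    rw [h]
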